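-- pv_equiv track=rewrite | github.com/vedkharche538/companies-coding-questions | Solutions/Infosys-q2.py | find_turns
-- ===== SOURCE A (Python) =====
-- def find_turns(S:list, N:int):
--     total_sum=0
--     for num in S:
--       total_sum += num
--     total_div=0
--     while N>0:
--       total_div+=N
--       N-=1
--     return total_sum//total_div
-- ===== SOURCE B (Python) =====
-- def find_turns(S, N):
--     return sum(S) // (N * (N + 1) // 2)
-- ===== Notes on version B (the rewrite author's own statement) =====
-- stated objective: simpler
-- what changed: Replaces the explicit summation loop with built-in sum and the while-loop accumulation of 1..N with the closed-form triangular number N*(N+1)//2, giving a one-line body.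
import Mathlib
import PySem

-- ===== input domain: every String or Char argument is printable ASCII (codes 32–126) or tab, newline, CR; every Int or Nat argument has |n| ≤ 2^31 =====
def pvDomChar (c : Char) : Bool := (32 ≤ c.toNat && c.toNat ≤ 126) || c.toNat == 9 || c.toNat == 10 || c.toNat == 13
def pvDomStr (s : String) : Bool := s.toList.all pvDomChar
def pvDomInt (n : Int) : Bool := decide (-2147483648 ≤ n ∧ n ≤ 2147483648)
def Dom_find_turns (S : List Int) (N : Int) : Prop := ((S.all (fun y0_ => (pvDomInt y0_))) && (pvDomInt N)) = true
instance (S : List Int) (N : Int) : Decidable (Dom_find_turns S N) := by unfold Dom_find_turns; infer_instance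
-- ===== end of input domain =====

-- B replaces A's while-loop for 1+2+...+N by the closed form N*(N+1)//2 and the
-- explicit summation loop by built-in sum (objective: simpler, one-line body).

-- ===== PORT A =====
-- while N>0: total_div+=N; N-=1
def findTurnsWhile (N : Int) (total_div : Int) : Int :=
  if _h : N > 0 then findTurnsWhile (N - 1) (total_div + N) else total_div
termination_by N.toNat
decreasing_by omega

def find_turns (S : List Int) (N : Int) : Int :=
  let total_sum := S.foldl (fun total_sum num => total_sum + num) 0
  let total_div := findTurnsWhile N 0
  PySem.Int.floordiv total_sum total_div

-- ===== PORT B =====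
def find_turns_alt (S : List Int) (N : Int) : Int :=
  PySem.Int.floordiv S.sum (PySem.Int.floordiv (N * (N + 1)) 2)

-- ===== PRECONDITION & SPEC =====
-- A raises ZeroDivisionError when N <= 0 (total_div stays 0); excluded.
def Pre_find_turns (S : List Int) (N : Int) : Prop := 0 < N
instance (S : List Int) (N : Int) : Decidable (Pre_find_turns S N) := by unfold Pre_find_turns; infer_instance
def pvWitness_find_turns : List Int × Int := ([3, 4, 5], 2)

def Spec_find_turns (S : List Int) (N : Int) (out : Int) : Prop := out = find_turns_alt S N
instance (S : List Int) (N : Int) (out : Int) : Decidable (Spec_find_turns S N out) := by unfold Spec_find_turns; infer_instance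

-- ===== CLAIM =====
def Claim_equal_find_turns : Prop := ∀ (S : List Int) (N : Int), Dom_find_turns S N → Pre_find_turns S N → Spec_find_turns S N (find_turns S N)

-- ===== LEMMAS AND PROOFS =====
theorem findTurnsWhile_eq (N acc : Int) (h : 0 ≤ N) :
    findTurnsWhile N acc = acc + PySem.Int.floordiv (N * (N + 1)) 2 := by
  induction N, h using Int.le_induction generalizing acc with
  | base =>
    rw [findTurnsWhile]
    norm_num [PySem.Int.floordiv]
  | succ n hn ih =>
    rw [findTurnsWhile]
    have h1 : n + 1 > 0 := by omega
    simp only [h1, dif_pos, add_sub_cancel_right, ih]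
    rw [PySem.Int.floordiv_eq_ediv_of_pos (by omega), PySem.Int.floordiv_eq_ediv_of_pos (by omega)]
    have h2 : (n + 1) * (n + 1 + 1) = n * (n + 1) + 2 * (n + 1) := by ring
    rw [h2, Int.add_mul_ediv_left _ _ (by norm_num : (2:Int) ≠ 0)]
    ring

theorem foldl_add_eq_sum (S : List Int) (acc : Int) :
    S.foldl (fun total_sum num => total_sum + num) acc = acc + S.sum := by
  induction S generalizing acc with
  | nil => simp
  | cons x xs ih => simp [List.foldl, ih]; ring

-- ===== VERDICT =====
theorem find_turns_spec : Claim_equal_find_turns := by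
  intro S N _ hN
  have hN2 : 0 < N := hN
  unfold Spec_find_turns find_turns find_turns_alt
  rw [findTurnsWhile_eq N 0 (by omega : (0:Int) ≤ N), foldl_add_eq_sum]
  simp
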